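-- pv_equiv track=rewrite | github.com/KritikaKumari22/Depth-Prediction-Project | Radial Neighbour Calculation/Radial_Neigh.py | gen_res_dict
-- ===== SOURCE A (Python) =====
-- def gen_res_dict(pdblines):
--     res_dict = {}
--     for x in pdblines:
--         # if x.split()[4][0] == 'A': #Just Using A chain, so only 1 model is being Used?
--         resid = (x[22:26].strip())
--         if resid in res_dict:
--             res_dict[resid].append(x) #Appending or putting the whole PDB line related to the residue "resid"
--         else:
--             res_dict[resid] = [x]
--
--     return res_dict
-- ===== SOURCE B (Python) =====
-- def gen_res_dict(pdblines):
--     # Two-pass: distinct residue ids in first-appearance order, then one filter per id.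
--     rids = [x[22:26].strip() for x in pdblines]
--     return {k: [x for x, r in zip(pdblines, rids) if r == k] for k in dict.fromkeys(rids)}
-- ===== Notes on version B (the rewrite author's own statement) =====
-- stated objective: alternative
-- what changed: Replaces the incremental dict-grouping loop (lookup + append/insert per line) with a two-pass decomposition: compute all residue ids, dedup them in first-appearance order, then build each group by one filter per distinct id.
import Mathlib
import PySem

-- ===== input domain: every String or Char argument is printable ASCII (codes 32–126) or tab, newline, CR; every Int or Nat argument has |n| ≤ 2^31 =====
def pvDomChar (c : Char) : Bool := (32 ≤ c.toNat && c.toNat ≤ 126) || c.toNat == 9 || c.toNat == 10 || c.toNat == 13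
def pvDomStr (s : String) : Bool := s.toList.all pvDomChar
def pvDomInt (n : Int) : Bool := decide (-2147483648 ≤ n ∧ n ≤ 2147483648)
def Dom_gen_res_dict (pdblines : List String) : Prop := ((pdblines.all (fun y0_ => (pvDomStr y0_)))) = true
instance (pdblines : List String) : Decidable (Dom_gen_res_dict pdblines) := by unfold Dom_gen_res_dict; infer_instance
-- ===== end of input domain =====

-- B replaces A's incremental dict-grouping loop by a two-pass decomposition (dedup the
-- residue ids, then one filter per distinct id); alternative structure, not faster.

-- resid = x[22:26].strip()  (shared text of both Pythons)
def pvResid (x : String) : String := PySem.Str.strip (PySem.Str.slice x (some 22) (some 26))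

-- ===== PORT A =====
def gen_res_dict (pdblines : List String) : List (String × List String) :=
  (pdblines.foldl (fun res_dict x =>
      let resid := pvResid x
      if res_dict.contains resid then
        res_dict.modify resid [] (fun l => l ++ [x])     -- res_dict[resid].append(x)
      else
        res_dict.insert resid [x])
    PySem.Dict.empty).items

-- ===== PORT B =====
def gen_res_dict_alt (pdblines : List String) : List (String × List String) :=
  let rids := pdblines.map pvResid
  (PySem.List.dedup rids).map (fun k =>
    (k, ((pdblines.zip rids).filter (fun p => p.2 == k)).map (·.1)))

-- ===== PRECONDITION & SPEC =====
def Spec_gen_res_dict (pdblines : List String) (out : List (String × List String)) : Prop := out = gen_res_dict_alt pdblines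
instance (pdblines : List String) (out : List (String × List String)) : Decidable (Spec_gen_res_dict pdblines out) := by unfold Spec_gen_res_dict; infer_instance

-- ===== CLAIM (what is proved, stated in full; the proofs are below) =====
def Claim_equal_gen_res_dict : Prop := ∀ (pdblines : List String), Dom_gen_res_dict pdblines → Spec_gen_res_dict pdblines (gen_res_dict pdblines)

-- ===== LEMMAS AND PROOFS =====

-- zipping a list with its own map and filtering on the second component is a plain filter
theorem pvZipFilter (l : List String) (k : String) :
    ((l.zip (l.map pvResid)).filter (fun p => p.2 == k)).map (·.1)
      = l.filter (fun x => pvResid x == k) := by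
  induction l with
  | nil => rfl
  | cons a t ih =>
    by_cases h : pvResid a = k
    · simp [h, ih]
    · have hb : (pvResid a == k) = false := by simp [h]
      simp [hb, ih]

-- first-occurrence dedup, one element appended
theorem pvDedupAppend (l : List String) (x : String) :
    PySem.List.dedup (l ++ [x])
      = if x ∈ l then PySem.List.dedup l else PySem.List.dedup l ++ [x] := by
  have : PySem.List.dedup (l ++ [x]) = PySem.Set.add (PySem.List.dedup l) x := by
    simp [PySem.List.dedup, PySem.Set.ofList, List.foldl_append, PySem.Set.add]
  rw [this]
  by_cases h : x ∈ l
  · simp [PySem.Set.add, List.contains_eq_mem, h]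
  · simp [PySem.Set.add, List.contains_eq_mem, h]

-- the grouping invariant of A's loop: after processing l, the dict's items are exactly
-- the distinct residue ids in first-appearance order, each paired with its filtered lines
theorem pvLoopInv (l : List String) :
    (l.foldl (fun res_dict x =>
        let resid := pvResid x
        if res_dict.contains resid then
          res_dict.modify resid [] (fun v => v ++ [x])
        else
          res_dict.insert resid [x])
      (PySem.Dict.empty : PySem.Dict String (List String))).items
      = (PySem.List.dedup (l.map pvResid)).map
          (fun k => (k, l.filter (fun x => pvResid x == k))) := by
  induction l using List.reverseRecOn with
  | nil => rfl
  | append_singleton t x ih =>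
    rw [List.foldl_append]
    set step := fun (res_dict : PySem.Dict String (List String)) (x : String) =>
      let resid := pvResid x
      if res_dict.contains resid then
        res_dict.modify resid [] (fun v => v ++ [x])
      else
        res_dict.insert resid [x] with hstep
    set d := t.foldl step PySem.Dict.empty with hd
    -- keys of d
    have hkeys : d.keys = PySem.List.dedup (t.map pvResid) := by
      have : d.keys = d.items.map (·.1) := rfl
      rw [this, ih, List.map_map]
      show List.map (fun k => k) _ = _
      exact List.map_id' _
    have hnd : d.keys.Nodup := by
      rw [hkeys]; exact PySem.List.nodup_dedup _
    have hcont : d.contains (pvResid x) = decide (pvResid x ∈ t.map pvResid) := by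
      rw [PySem.Dict.contains_eq_decide_mem_keys, hkeys]
      by_cases h : pvResid x ∈ t.map pvResid
      · simp [h]
      · simp [h]
    rw [List.foldl_cons, List.foldl_nil]
    rw [List.map_append]
    simp only [List.map_cons, List.map_nil]
    rw [pvDedupAppend]
    by_cases hmem : pvResid x ∈ t.map pvResid
    · -- residue already present: modify appends x to its group
      have hc : d.contains (pvResid x) = true := by rw [hcont]; simpa using hmem
      have hget : d.getD (pvResid x) [] = t.filter (fun y => pvResid y == pvResid x) := by
        apply PySem.Dict.getD_of_mem_items d _ hnd
        rw [ih]
        exact List.mem_map_of_mem ((PySem.List.mem_dedup _ _).mpr hmem)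
      show (step d x).items = _
      rw [hstep]
      simp only [hc, if_true, PySem.Dict.modify]
      rw [PySem.Dict.items_insert_of_contains d _ hc, hget, ih, List.map_map]
      simp only [hmem, if_true]
      apply List.map_congr_left
      intro k hk
      by_cases hkx : k = pvResid x
      · subst hkx
        simp [List.filter_append, List.filter]
      · have : (pvResid x == k) = false := by
          simp only [beq_eq_false_iff_ne, ne_eq]
          exact fun h => hkx h.symm
        simp [Function.comp, hkx, List.filter_append, List.filter, this]
    · -- fresh residue: insert appends a new singleton group at the end
      have hc : d.contains (pvResid x) = false := by rw [hcont]; simpa using hmem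
      show (step d x).items = _
      rw [hstep]
      simp only [hc, if_false, Bool.false_eq_true]
      rw [PySem.Dict.items_insert_of_not_contains d _ hc, ih]
      simp only [hmem, if_false]
      rw [List.map_append]
      congr 1
      · apply List.map_congr_left
        intro k hk
        have hkt : k ∈ t.map pvResid := (PySem.List.mem_dedup _ _).mp hk
        have hkx : (pvResid x == k) = false := by
          simp only [beq_eq_false_iff_ne, ne_eq]
          intro h; exact hmem (h ▸ hkt)
        simp [List.filter_append, List.filter, hkx]
      · have hnil : t.filter (fun y => pvResid y == pvResid x) = [] := by
          apply List.filter_eq_nil_iff.mpr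
          intro a ha
          simp only [beq_eq_false_iff_ne, ne_eq, Bool.not_eq_true, beq_eq_false_iff_ne]
          intro h; exact hmem (h ▸ List.mem_map_of_mem ha)
        simp [List.filter_append, List.filter, hnil]

-- ===== VERDICT (by name: the statement is the Claim_ definition above) =====
theorem gen_res_dict_spec : Claim_equal_gen_res_dict := by
  intro pdblines _
  show gen_res_dict pdblines = gen_res_dict_alt pdblines
  unfold gen_res_dict gen_res_dict_alt
  rw [pvLoopInv]
  apply List.map_congr_left
  intro k _
  rw [pvZipFilter]
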